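-- pv_equiv track=rewrite | github.com/lymanmcbride/challenges | tournamentFunction.py | tournament
-- ===== SOURCE A (Python) =====
-- def tournament(array):
--     final_lineUp = [array]
--     while len(array) > 1:
--         newArray = []
--         if (len(array) % 2 != 0):
--             newArray.append(array[len(array) - 1])
--         for i, num in enumerate(array):
--             try:
--                 if i % 2 == 0:
--                     nextNum = array[i+1]
--                     if num > nextNum:
--                         newArray.append(num)
--                     else:
--                         newArray.append(nextNum)
--             except IndexError:
--                 continue
--         array = newArray
--         final_lineUp.append(array)
--
--     return final_lineUp
-- ===== SOURCE B (Python) =====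
-- def tournament(array):
--     # Recursive decomposition: build one round as a range-comprehension, recurse on it.
--     if len(array) <= 1:
--         return [array]
--     nxt = ([array[-1]] if len(array) % 2 != 0 else []) \
--         + [max(array[i], array[i + 1]) for i in range(0, len(array) - 1, 2)]
--     return [array] + tournament(nxt)
-- ===== Notes on version B (the rewrite author's own statement) =====
-- stated objective: simpler
-- what changed: Replaced A's while-loop with mutable accumulator, enumerate over all indices and try/except-IndexError pair handling by a recursion over rounds whose pair list is a single range(0, n-1, 2) comprehension.
import Mathlib
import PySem

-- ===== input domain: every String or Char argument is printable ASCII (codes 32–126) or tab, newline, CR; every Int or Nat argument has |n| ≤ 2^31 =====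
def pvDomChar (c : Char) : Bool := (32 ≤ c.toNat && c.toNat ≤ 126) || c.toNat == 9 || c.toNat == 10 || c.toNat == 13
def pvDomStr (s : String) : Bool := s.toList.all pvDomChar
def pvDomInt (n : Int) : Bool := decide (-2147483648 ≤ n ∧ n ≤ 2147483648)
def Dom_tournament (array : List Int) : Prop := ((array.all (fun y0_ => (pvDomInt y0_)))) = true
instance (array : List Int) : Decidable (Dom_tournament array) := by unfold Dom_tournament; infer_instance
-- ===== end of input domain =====

-- B replaces A's while-loop + enumerate/try-except round building with a recursion over rounds
-- whose pair list is a range(0, n-1, 2) comprehension (objective: simpler decomposition, same cost).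

-- ===== PORT A =====
-- proof helper used only in lemmas (two-at-a-time pairing of a list); it sits above the ports
-- because tournament's decreasing_by cites roundA_length_lt, whose proof goes through it.
def pairmax : List Int → List Int
  | a :: b :: t => max a b :: pairmax t
  | _ => []

theorem pairmax_length : ∀ xs : List Int, (pairmax xs).length = xs.length / 2
  | [] => by simp [pairmax]
  | [_] => by simp [pairmax]
  | _ :: _ :: t => by
      simp only [pairmax, List.length_cons, pairmax_length t]
      omega

-- body of A's `for i, num in enumerate(array)` loop (the `try/except IndexError: continue`
-- is the `none` branch of pyGet?)
def funA (array : List Int) (acc : List Int) (p : Int × Int) : List Int :=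
  if PySem.Int.mod p.1 2 = 0 then
    match PySem.List.pyGet? array (p.1 + 1) with
    | some nextNum => acc ++ [if p.2 > nextNum then p.2 else nextNum]
    | none => acc
  else acc

-- one iteration of A's while loop: newArray
def roundA (array : List Int) : List Int :=
  (PySem.List.enumerate array 0).foldl (funA array)
    (if array.length % 2 ≠ 0 then
       match PySem.List.pyGet? array ((array.length : Int) - 1) with
       | some x => [x]
       | none => []
     else [])

-- A's loop over enumerate, started at an even offset into the full array, appends exactly
-- the pairwise maxima of the suffix.
theorem foldA_gen : ∀ (xs pre acc : List Int), pre.length % 2 = 0 →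
    (PySem.List.enumerate xs (pre.length : Int)).foldl (funA (pre ++ xs)) acc = acc ++ pairmax xs
  | [], _, acc, _ => by simp [PySem.List.enumerate, pairmax]
  | [a], pre, acc, hpar => by
      simp only [PySem.List.enumerate_cons, PySem.List.enumerate, List.foldl]
      have h1 : ((pre.length : Int) + 1) = ((pre.length + 1 : Nat) : Int) := by push_cast; ring
      have h2 : PySem.List.pyGet? (pre ++ [a]) ((pre.length : Int) + 1) = none := by
        rw [h1, PySem.List.pyGet?_natCast]; simp
      simp [funA, PySem.Int.mod_natCast, hpar, h2, pairmax]
  | a :: b :: t, pre, acc, hpar => by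
      simp only [PySem.List.enumerate_cons, List.foldl]
      have hL1 : ((pre.length : Int) + 1) = ((pre.length + 1 : Nat) : Int) := by push_cast; ring
      have hstep1 : funA (pre ++ a :: b :: t) acc ((pre.length : Int), a) = acc ++ [max a b] := by
        simp only [funA, PySem.Int.mod_natCast, hpar]
        rw [hL1, PySem.List.pyGet?_natCast, List.getElem?_append_right (by omega)]
        simp only [Nat.add_sub_cancel_left]
        have hb : (a :: b :: t)[1]? = some b := rfl
        rw [hb]
        have hmax : (if a > b then a else b) = max a b := by
          rcases le_or_gt a b with h | h
          · simp [not_lt.mpr h, max_eq_right h]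
          · simp [h, max_eq_left (le_of_lt h)]
        simp [hmax]
        omega
      have hodd : (pre.length + 1) % 2 = 1 := by omega
      have hstep2 : funA (pre ++ a :: b :: t) (acc ++ [max a b]) ((pre.length : Int) + 1, b)
          = acc ++ [max a b] := by
        simp only [funA, PySem.Int.mod_eq_zero_iff_dvd]
        rw [if_neg (by omega)]
      rw [hstep1, hstep2]
      have harr : pre ++ a :: b :: t = (pre ++ [a, b]) ++ t := by simp
      have hlen : ((pre.length : Int) + 1 + 1) = (((pre ++ [a, b]).length : Nat) : Int) := by
        simp; push_cast; ring
      rw [harr, hlen, foldA_gen t (pre ++ [a, b]) (acc ++ [max a b]) (by simp; omega)]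
      simp [pairmax]

theorem roundA_eq (array : List Int) :
    roundA array
      = (if array.length % 2 ≠ 0 then
           match PySem.List.pyGet? array ((array.length : Int) - 1) with
           | some x => [x]
           | none => []
         else []) ++ pairmax array := by
  have h := foldA_gen array [] (if array.length % 2 ≠ 0 then
       match PySem.List.pyGet? array ((array.length : Int) - 1) with
       | some x => [x]
       | none => []
     else []) (by simp)
  simpa [roundA] using h

theorem roundA_length_lt (array : List Int) (h : 1 < array.length) :
    (roundA array).length < array.length := by
  rw [roundA_eq, List.length_append, pairmax_length]
  by_cases hpar : array.length % 2 = 0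
  · simp [hpar]; omega
  · have hnn : ((array.length : Int) - 1) = ((array.length - 1 : Nat) : Int) := by
      push_cast [Nat.cast_sub (by omega : 1 ≤ array.length)]; ring
    rw [if_pos hpar, hnn, PySem.List.pyGet?_natCast]
    rw [List.getElem?_eq_getElem (by omega)]
    simp
    omega

def tournament (array : List Int) : List (List Int) :=
  if h : 1 < array.length then
    array :: tournament (roundA array)
  else [array]
termination_by array.length
decreasing_by exact roundA_length_lt array h

-- ===== PORT B =====
-- one round of B: the odd leftover prepended, then the range(0, n-1, 2) comprehension
def roundB (array : List Int) : List Int :=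
  (if array.length % 2 ≠ 0 then
     match PySem.List.pyGet? array (-1) with
     | some x => [x]
     | none => []
   else [])
  ++ (PySem.List.pyRange 0 ((array.length : Int) - 1) 2).map
       (fun i => max (PySem.List.pyGetD array i 0) (PySem.List.pyGetD array (i + 1) 0))

theorem roundB_length_lt (array : List Int) (h : ¬ array.length ≤ 1) :
    (roundB array).length < array.length := by
  rw [roundB, List.length_append, List.length_map,
      PySem.List.pyRange_of_pos 0 ((array.length : Int) - 1) (by norm_num)]
  rw [List.length_map, List.length_range]
  have h2 : 2 ≤ array.length := by omega
  have hc : (0:Int) < (array.length : Int) - 1 := by omega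
  rw [if_pos hc]
  have harith : (((array.length : Int) - 1 - 0 + 2 - 1) / 2).toNat = array.length / 2 := by
    omega
  rw [harith]
  have hpref : (if array.length % 2 ≠ 0 then
     match PySem.List.pyGet? array (-1) with
     | some x => [x]
     | none => []
   else []).length ≤ 1 := by
    split
    · match PySem.List.pyGet? array (-1) with
      | some x => simp
      | none => simp
    · simp
  by_cases hpar : array.length % 2 = 0
  · simp [hpar]; omega
  · omega

def tournament_alt (array : List Int) : List (List Int) :=
  if h : array.length ≤ 1 then [array]
  else array :: tournament_alt (roundB array)
termination_by array.length
decreasing_by exact roundB_length_lt array h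

-- ===== PRECONDITION & SPEC =====
def Spec_tournament (array : List Int) (out : List (List Int)) : Prop := out = tournament_alt array
instance (array : List Int) (out : List (List Int)) : Decidable (Spec_tournament array out) := by unfold Spec_tournament; infer_instance

-- ===== CLAIM (what is proved, stated in full; the proofs are below) =====
def Claim_equal_tournament : Prop := ∀ (array : List Int), Dom_tournament array → Spec_tournament array (tournament array)

-- ===== LEMMAS AND PROOFS =====

-- B's comprehension over range(0, n-1, 2) is the pairwise-max list.
theorem mapRange_eq_pairmax : ∀ xs : List Int,
    (List.range (xs.length / 2)).map
        (fun k => max (xs.getD (2 * k) 0) (xs.getD (2 * k + 1) 0)) = pairmax xs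
  | [] => by simp [pairmax]
  | [_] => by simp [pairmax]
  | a :: b :: t => by
      have hlen : (a :: b :: t).length / 2 = t.length / 2 + 1 := by simp; omega
      rw [hlen, List.range_succ_eq_map, List.map_cons, List.map_map]
      simp only [pairmax]
      have htail : ∀ k, k ∈ List.range (t.length / 2) →
          ((fun k => max ((a :: b :: t).getD (2 * k) 0) ((a :: b :: t).getD (2 * k + 1) 0))
            ∘ Nat.succ) k
            = (fun k => max (t.getD (2 * k) 0) (t.getD (2 * k + 1) 0)) k := by
        intro k _
        simp only [Function.comp_apply, Nat.succ_eq_add_one]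
        have e1 : 2 * (k + 1) = 2 * k + 1 + 1 := by ring
        rw [e1]
        simp only [List.getD_cons_succ]
      rw [List.map_congr_left htail, mapRange_eq_pairmax t]
      simp

theorem roundB_eq_pairs (array : List Int) :
    (PySem.List.pyRange 0 ((array.length : Int) - 1) 2).map
       (fun i => max (PySem.List.pyGetD array i 0) (PySem.List.pyGetD array (i + 1) 0))
      = pairmax array := by
  rw [PySem.List.pyRange_of_pos 0 ((array.length : Int) - 1) (by norm_num), List.map_map]
  rw [← mapRange_eq_pairmax array]
  by_cases h : array.length ≤ 1
  · have hc : ¬ (0:Int) < (array.length : Int) - 1 := by omega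
    rw [if_neg hc]
    have : array.length / 2 = 0 := by omega
    simp [this]
  · have hc : (0:Int) < (array.length : Int) - 1 := by omega
    rw [if_pos hc]
    have harith : (((array.length : Int) - 1 - 0 + 2 - 1) / 2).toNat = array.length / 2 := by
      omega
    rw [harith]
    apply List.map_congr_left
    intro k hk
    rw [List.mem_range] at hk
    have e1 : ((0 : Int) + 2 * (k : Int)) = ((2 * k : Nat) : Int) := by push_cast; ring
    have e2 : ((2 * k : Nat) : Int) + 1 = ((2 * k + 1 : Nat) : Int) := by push_cast; ring
    simp only [Function.comp, e1, e2, PySem.List.pyGetD_natCast]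

theorem roundA_eq_roundB (array : List Int) : roundA array = roundB array := by
  rw [roundA_eq, roundB, roundB_eq_pairs]
  congr 1
  by_cases hpar : array.length % 2 = 0
  · simp [hpar]
  · rw [if_pos hpar, if_pos hpar]
    have hpos : 0 < array.length := by omega
    have hnn : ((array.length : Int) - 1) = ((array.length - 1 : Nat) : Int) := by
      push_cast [Nat.cast_sub (by omega : 1 ≤ array.length)]; ring
    rw [hnn, PySem.List.pyGet?_natCast]
    have hneg : PySem.List.pyGet? array (-1) = array[array.length - 1]? := by
      simp only [PySem.List.pyGet?, PySem.List.pyIdx?]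
      rw [if_neg (by omega), if_pos (by omega)]
      simp
    rw [hneg]

theorem tournament_eq_alt (array : List Int) : tournament array = tournament_alt array := by
  induction hn : array.length using Nat.strong_induction_on generalizing array with
  | _ n ih =>
    rw [tournament, tournament_alt]
    by_cases h : 1 < array.length
    · rw [dif_pos h, dif_neg (by omega)]
      rw [roundA_eq_roundB]
      have hlt : (roundB array).length < n := by
        rw [← roundA_eq_roundB]; rw [← hn]; exact roundA_length_lt array h
      rw [ih (roundB array).length (by omega) (roundB array) rfl]
    · rw [dif_neg h, dif_pos (by omega)]

-- ===== VERDICT (by name: the statement is the Claim_ definition above) =====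
theorem tournament_spec : Claim_equal_tournament := by
  intro array _
  unfold Spec_tournament
  exact tournament_eq_alt array
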